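-- pv_equiv track=rewrite | github.com/kalwar/Codility | Gallium2018.py | pows
-- ===== SOURCE A (Python) =====
-- def pows(n):
--     two = 0
--     while n and n % 2 == 0:
--         n //= 2
--         two += 1
--
--     five = 0
--     while n and n % 5 == 0:
--         n //= 5
--         five += 1
--
--     return (two, five)
-- ===== SOURCE B (Python) =====
-- def _five(n):
--     if n % 5 != 0:
--         return 0
--     return 1 + _five(n // 5)
--
--
-- def pows(n):
--     # B: count of 2s via the trailing-zero bit trick on |n| (closed form,
--     # no division loop); count of 5s by recursion on the ORIGINAL n
--     # (removing factors of 2 does not change the 5-adic valuation).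
--     if n == 0:
--         return (0, 0)
--     a = -n if n < 0 else n
--     two = (a ^ (a - 1)).bit_length() - 1
--     return (two, _five(n))
-- ===== Notes on version B (the rewrite author's own statement) =====
-- stated objective: alternative
-- what changed: The count of twos is obtained in closed form from bit_length of (abs(n) XOR (abs(n) minus one)) instead of a division loop, and the count of fives is computed by a recursive helper on the original n instead of a second while-loop over the two-reduced n.
import Mathlib
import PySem

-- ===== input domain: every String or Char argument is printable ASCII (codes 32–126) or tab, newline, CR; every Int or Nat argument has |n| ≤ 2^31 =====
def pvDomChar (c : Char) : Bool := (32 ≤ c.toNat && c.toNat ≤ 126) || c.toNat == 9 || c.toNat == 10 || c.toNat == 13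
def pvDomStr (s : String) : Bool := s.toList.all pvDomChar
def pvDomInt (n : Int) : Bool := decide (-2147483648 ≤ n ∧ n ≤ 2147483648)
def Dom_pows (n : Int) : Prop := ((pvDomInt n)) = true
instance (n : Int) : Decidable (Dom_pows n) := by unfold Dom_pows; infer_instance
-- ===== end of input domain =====

-- B computes the 2-count by the trailing-zero bit trick on |n| and the 5-count by recursion on the original n; equivalence of return values is proved for all n in the domain.


-- termination helper for the division loops (exact division shrinks |n|)
theorem pvFloordivAbsLt (n d : Int) (hd : 1 < d) (hn : n ≠ 0) (h : PySem.Int.mod n d = 0) :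
    (PySem.Int.floordiv n d).natAbs < n.natAbs := by
  rcases (PySem.Int.mod_eq_zero_iff_dvd n d).1 h with ⟨t, ht⟩
  have hq : PySem.Int.floordiv n d = t := by
    rw [PySem.Int.floordiv_eq_ediv_of_pos (by omega), ht, mul_comm,
      Int.mul_ediv_cancel _ (by omega)]
  rw [hq]
  have : t ≠ 0 := by rintro rfl; simp at ht; omega
  have hdt : n.natAbs = d.natAbs * t.natAbs := by rw [ht]; exact Int.natAbs_mul d t
  have : 1 < d.natAbs := by omega
  nlinarith [Int.natAbs_pos.2 ‹t ≠ 0›]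

-- ===== PORT A =====
-- while n and n % 2 == 0: n //= 2; two += 1    (returns the final n and two)
def powsLoop2 (n : Int) (two : Int) : Int × Int :=
  if h : n ≠ 0 ∧ PySem.Int.mod n 2 = 0 then
    powsLoop2 (PySem.Int.floordiv n 2) (two + 1)
  else (n, two)
termination_by n.natAbs
decreasing_by exact pvFloordivAbsLt n 2 (by omega) h.1 h.2

-- while n and n % 5 == 0: n //= 5; five += 1    (returns the final n and five)
def powsLoop5 (n : Int) (five : Int) : Int × Int :=
  if h : n ≠ 0 ∧ PySem.Int.mod n 5 = 0 then
    powsLoop5 (PySem.Int.floordiv n 5) (five + 1)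
  else (n, five)
termination_by n.natAbs
decreasing_by exact pvFloordivAbsLt n 5 (by omega) h.1 h.2

def pows (n : Int) : Int × Int :=
  let p := powsLoop2 n 0
  let q := powsLoop5 p.1 0
  (p.2, q.2)

-- ===== PORT B =====
-- _five(n): if n % 5 != 0: return 0; return 1 + _five(n // 5)
-- (the `n = 0` test is a totalization guard only: B never calls _five with 0,
--  and for n ≠ 0 the guard never fires since then n % 5 == 0 → n // 5 path)
def fiveRec (n : Int) : Int :=
  if PySem.Int.mod n 5 ≠ 0 then 0
  else if h0 : n = 0 then 0
  else 1 + fiveRec (PySem.Int.floordiv n 5)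
termination_by n.natAbs
decreasing_by
  exact pvFloordivAbsLt n 5 (by omega) h0 (by simpa using ‹¬PySem.Int.mod n 5 ≠ 0›)

def pows_alt (n : Int) : Int × Int :=
  if n = 0 then (0, 0)
  else
    let a : Int := if n < 0 then -n else n
    let two : Int := (PySem.Int.bitLength (PySem.Int.bxor a (a - 1)) : Int) - 1
    (two, fiveRec n)

-- ===== PRECONDITION & SPEC =====
def Spec_pows (n : Int) (out : Int × Int) : Prop := out = pows_alt n
instance (n : Int) (out : Int × Int) : Decidable (Spec_pows n out) := by unfold Spec_pows; infer_instance

-- ===== CLAIM (what is proved, stated in full; the proofs are below) =====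
def Claim_equal_pows : Prop := ∀ (n : Int), Dom_pows n → Spec_pows n (pows n)

-- ===== LEMMAS AND PROOFS =====

-- xor of an even and an odd number, bit by bit
theorem pvXorEvenOdd (x y : Nat) : (2 * x) ^^^ (2 * y + 1) = 2 * (x ^^^ y) + 1 := by
  apply Nat.eq_of_testBit_eq
  intro i
  cases i with
  | zero => simp [Nat.testBit_zero]
  | succ j =>
      rw [Nat.testBit_add_one, Nat.testBit_add_one, Nat.xor_div_two,
        Nat.mul_div_cancel_left x (by norm_num),
        show (2 * y + 1) / 2 = y by omega,
        show (2 * (x ^^^ y) + 1) / 2 = x ^^^ y by omega]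

-- the trailing-zero trick: for odd b, (2^k*b) ^^^ (2^k*b - 1) = 2^(k+1) - 1
theorem pvXorSubOne (k b : Nat) (hb : b % 2 = 1) :
    (2 ^ k * b) ^^^ (2 ^ k * b - 1) = 2 ^ (k + 1) - 1 := by
  induction k with
  | zero =>
      obtain ⟨t, rfl⟩ : ∃ t, b = 2 * t + 1 := ⟨b / 2, by omega⟩
      have h2 : 2 ^ 0 * (2 * t + 1) - 1 = 2 * t := by omega
      have h1 : 2 ^ 0 * (2 * t + 1) = 2 * t + 1 := by ring
      rw [h2, h1, Nat.xor_comm, pvXorEvenOdd]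
      simp
  | succ k ih =>
      have hpos : 0 < 2 ^ k * b := Nat.mul_pos (Nat.two_pow_pos k) (by omega)
      have h2 : 2 ^ (k + 1) * b - 1 = 2 * (2 ^ k * b - 1) + 1 := by
        have h3 : 2 ^ (k + 1) * b = 2 * (2 ^ k * b) := by ring
        omega
      have h1 : 2 ^ (k + 1) * b = 2 * (2 ^ k * b) := by ring
      rw [h2, h1, pvXorEvenOdd, ih]
      have h4 : 0 < 2 ^ (k + 1) := Nat.two_pow_pos (k + 1)
      have h5 : 2 ^ (k + 2) = 2 * 2 ^ (k + 1) := by ring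
      omega

-- bitLength of 2^(k+1) - 1 is k+1
theorem pvBitLengthPow (k : Nat) :
    PySem.Int.bitLength ((2 ^ (k + 1) - 1 : Nat) : Int) = k + 1 := by
  have hp : 0 < 2 ^ k := Nat.two_pow_pos k
  have hpe : 2 ^ (k + 1) = 2 * 2 ^ k := by ring
  have hvne : ((2 ^ (k + 1) - 1 : Nat) : Int) ≠ 0 := by omega
  have h1 := PySem.Int.lt_two_pow_bitLength ((2 ^ (k + 1) - 1 : Nat) : Int)
  have h2 := PySem.Int.two_pow_bitLength_le _ hvne
  rw [Int.natAbs_natCast] at h1 h2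
  set L := PySem.Int.bitLength ((2 ^ (k + 1) - 1 : Nat) : Int) with hL
  have hkL : k < L := by
    have hlt : 2 ^ k < 2 ^ L := by omega
    exact (Nat.pow_lt_pow_iff_right (by omega)).1 hlt
  have hLk : L ≤ k + 1 := by
    have hlt : 2 ^ (L - 1) < 2 ^ (k + 1) := by omega
    have := (Nat.pow_lt_pow_iff_right (by omega : 1 < 2)).1 hlt
    omega
  omega

-- loop A2 on 2^k * m with odd m: strips exactly k factors of 2
theorem pvLoop2Char (k : Nat) (m c : Int) (hm : PySem.Int.mod m 2 ≠ 0) :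
    powsLoop2 (2 ^ k * m) c = (m, c + k) := by
  induction k generalizing c with
  | zero =>
      rw [powsLoop2]
      simp only [pow_zero, one_mul]
      rw [dif_neg (by tauto)]
      simp
  | succ k ih =>
      have hm0 : m ≠ 0 := by rintro rfl; simp [PySem.Int.mod] at hm
      have hne : (2:Int) ^ (k + 1) * m ≠ 0 := by positivity
      have hdvd : PySem.Int.mod ((2:Int) ^ (k + 1) * m) 2 = 0 := by
        rw [PySem.Int.mod_eq_zero_iff_dvd]
        exact ⟨2 ^ k * m, by ring⟩
      have hdiv : PySem.Int.floordiv ((2:Int) ^ (k + 1) * m) 2 = 2 ^ k * m := by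
        rw [PySem.Int.floordiv_eq_ediv_of_pos (by omega)]
        have he : (2:Int) ^ (k + 1) * m = 2 ^ k * m * 2 := by ring
        rw [he, Int.mul_ediv_cancel _ (by omega)]
      rw [powsLoop2, dif_pos ⟨hne, hdvd⟩, hdiv, ih]
      refine Prod.ext rfl ?_
      push_cast
      ring

-- loop A5 accumulates exactly fiveRec
theorem pvLoop5Char (m : Int) (c : Int) (hm : m ≠ 0) :
    (powsLoop5 m c).2 = c + fiveRec m := by
  by_cases h5 : PySem.Int.mod m 5 = 0
  · rcases (PySem.Int.mod_eq_zero_iff_dvd m 5).1 h5 with ⟨t, ht⟩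
    have ht0 : t ≠ 0 := by rintro rfl; simp at ht; exact hm ht
    have hdiv : PySem.Int.floordiv m 5 = t := by
      rw [PySem.Int.floordiv_eq_ediv_of_pos (by omega), ht, mul_comm,
        Int.mul_ediv_cancel _ (by omega)]
    rw [powsLoop5, dif_pos ⟨hm, h5⟩, hdiv]
    rw [fiveRec, if_neg (by simpa using h5), dif_neg hm, hdiv]
    rw [pvLoop5Char t (c + 1) ht0]
    ring
  · rw [powsLoop5, dif_neg (by tauto), fiveRec, if_pos h5]
    ring
termination_by m.natAbs
decreasing_by
  subst ht
  have : t.natAbs < (5 * t).natAbs := by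
    have := Int.natAbs_mul (5:Int) t
    have := Int.natAbs_pos.2 ht0
    omega
  simpa [hdiv] using this

-- 5-adic count is unchanged by a factor of 2
theorem pvFiveTwoMul (m : Int) (hm : m ≠ 0) : fiveRec (2 * m) = fiveRec m := by
  by_cases h5 : (5:Int) ∣ m
  · rcases h5 with ⟨t, rfl⟩
    have ht0 : t ≠ 0 := by rintro rfl; simp at hm
    have h1 : PySem.Int.mod (2 * (5 * t)) 5 = 0 := by
      rw [PySem.Int.mod_eq_zero_iff_dvd]; exact ⟨2 * t, by ring⟩
    have h2 : PySem.Int.mod (5 * t) 5 = 0 := by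
      rw [PySem.Int.mod_eq_zero_iff_dvd]; exact ⟨t, rfl⟩
    have hd1 : PySem.Int.floordiv (2 * (5 * t)) 5 = 2 * t := by
      rw [PySem.Int.floordiv_eq_ediv_of_pos (by omega)]
      have : (2:Int) * (5 * t) = 2 * t * 5 := by ring
      rw [this, Int.mul_ediv_cancel _ (by omega)]
    have hd2 : PySem.Int.floordiv (5 * t) 5 = t := by
      rw [PySem.Int.floordiv_eq_ediv_of_pos (by omega), mul_comm,
        Int.mul_ediv_cancel _ (by omega)]
    rw [fiveRec, if_neg (by simpa using h1), dif_neg (by intro h; omega), hd1]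
    rw [show fiveRec (5 * t) = 1 + fiveRec t by
      rw [fiveRec, if_neg (by simpa using h2), dif_neg hm, hd2]]
    rw [pvFiveTwoMul t ht0]
  · have h1 : PySem.Int.mod (2 * m) 5 ≠ 0 := by
      rw [Ne, PySem.Int.mod_eq_zero_iff_dvd]
      intro h; exact h5 (by omega)
    have h2 : PySem.Int.mod m 5 ≠ 0 := by
      rw [Ne, PySem.Int.mod_eq_zero_iff_dvd]; exact h5
    rw [fiveRec, if_pos h1, fiveRec, if_pos h2]
termination_by m.natAbs
decreasing_by
  have := Int.natAbs_mul (5:Int) t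
  have := Int.natAbs_pos.2 ht0
  omega

theorem pvFivePowTwoMul (k : Nat) (m : Int) (hm : m ≠ 0) :
    fiveRec (2 ^ k * m) = fiveRec m := by
  induction k with
  | zero => norm_num
  | succ k ih =>
      have h1 : (2:Int) ^ (k + 1) * m = 2 * (2 ^ k * m) := by ring
      have h2 : (2:Int) ^ k * m ≠ 0 := by positivity
      rw [h1, pvFiveTwoMul _ h2, ih]

-- every nonzero integer is 2^k * (odd m)
theorem pvDecomp (n : Int) (hn : n ≠ 0) :
    ∃ (k : Nat) (m : Int), PySem.Int.mod m 2 ≠ 0 ∧ n = 2 ^ k * m := by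
  by_cases h2 : (2:Int) ∣ n
  · rcases h2 with ⟨t, rfl⟩
    have ht0 : t ≠ 0 := by rintro rfl; simp at hn
    rcases pvDecomp t ht0 with ⟨k, m, hm, rfl⟩
    exact ⟨k + 1, m, hm, by ring⟩
  · refine ⟨0, n, ?_, by ring⟩
    rw [Ne, PySem.Int.mod_eq_zero_iff_dvd]; exact h2
termination_by n.natAbs
decreasing_by
  have := Int.natAbs_mul (2:Int) t
  have := Int.natAbs_pos.2 ht0
  omega

-- odd Int ↔ odd natAbs
theorem pvOddNatAbs (m : Int) (hm : PySem.Int.mod m 2 ≠ 0) : m.natAbs % 2 = 1 := by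
  rw [Ne, PySem.Int.mod_eq_zero_iff_dvd] at hm
  omega

-- the B-side 2-count on n = 2^k * m (m odd) is k
theorem pvAltTwo (k : Nat) (m : Int) (hm : PySem.Int.mod m 2 ≠ 0) :
    (PySem.Int.bitLength
        (PySem.Int.bxor (if (2:Int) ^ k * m < 0 then -(2 ^ k * m) else 2 ^ k * m)
          ((if (2:Int) ^ k * m < 0 then -(2 ^ k * m) else 2 ^ k * m) - 1)) : Int) - 1 = k := by
  set n : Int := 2 ^ k * m with hn
  have hm0 : m ≠ 0 := by rintro rfl; simp [PySem.Int.mod] at hm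
  have hn0 : n ≠ 0 := by rw [hn]; positivity
  set a : Int := if n < 0 then -n else n with ha
  have hpos : 1 ≤ n.natAbs := Int.natAbs_pos.2 hn0
  have haabs : a = (n.natAbs : Int) := by rw [ha]; omega
  have ham1 : a - 1 = ((n.natAbs - 1 : Nat) : Int) := by rw [haabs]; omega
  have hA : n.natAbs = 2 ^ k * m.natAbs := by
    rw [hn, Int.natAbs_mul]
    simp [Int.natAbs_pow]
  have key : PySem.Int.bxor a (a - 1) = ((2 ^ (k + 1) - 1 : Nat) : Int) := by
    rw [ham1, haabs, PySem.Int.bxor_natCast]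
    congr 1
    rw [hA]
    exact pvXorSubOne k m.natAbs (pvOddNatAbs m hm)
  rw [key, pvBitLengthPow]
  push_cast
  ring

-- ===== VERDICT (by name: the statement is the Claim_ definition above) =====
theorem pows_spec : Claim_equal_pows := by
  intro n _
  unfold Spec_pows
  by_cases hn : n = 0
  · subst hn
    have h2 : powsLoop2 0 0 = (0, 0) := by rw [powsLoop2]; simp
    have h5 : powsLoop5 0 0 = (0, 0) := by rw [powsLoop5]; simp
    simp [pows, pows_alt, h2, h5]
  · rcases pvDecomp n hn with ⟨k, m, hm, rfl⟩
    have hm0 : m ≠ 0 := by rintro rfl; simp [PySem.Int.mod] at hm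
    show pows (2 ^ k * m) = pows_alt (2 ^ k * m)
    unfold pows pows_alt
    rw [if_neg (by positivity : ¬(2:Int) ^ k * m = 0)]
    simp only [pvLoop2Char k m 0 hm]
    rw [pvLoop5Char m 0 hm0, pvFivePowTwoMul k m hm0]
    refine Prod.ext ?_ (by simp)
    simpa using (pvAltTwo k m hm).symm
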